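-- pv_equiv track=rewrite | github.com/OliverSpacey/Data-Driven-Assignment-OCR | data driven assignment/system.py | checkDiagTR
-- ===== SOURCE A (Python) =====
-- def compare(string, array):
--     for i in range(len(string)):
--         if string[i] != array[i]:
--             return False
--     return True
--
-- def compareEstimate(string, array):
--     incorrect = 0
--     for i in range(len(string)):
--         if string[i] != array[i]:
--             incorrect += 1
--     if incorrect > 1:
--         return False
--     else:
--         return True
--
-- def checkDiagTR(array, word, i, j, height, width, estimate):
--     temp = []
--     if i-len(word)+1 > 0 and j+len(word)-1 < width:
--         for x in range(len(word)):
--             temp.append(array[i-x][j+x])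
--         if (compare(word, temp) and not estimate) or (compareEstimate(word, temp) and estimate):
--             return True
--     return False
-- ===== SOURCE B (Python) =====
-- def checkDiagTR(array, word, i, j, height, width, estimate):
--     n = len(word)
--     if i - n + 1 > 0 and j + n - 1 < width:
--         k = next((x for x in range(n) if word[x] != array[i - x][j + x]), None)
--         if k is None:
--             return True
--         if estimate:
--             return all(word[x] == array[i - x][j + x] for x in range(k + 1, n))
--     return False
-- ===== Notes on version B (the rewrite author's own statement) =====
-- stated objective: alternative
-- what changed: Replaces A's build-the-diagonal-then-dispatch-to-compare/compareEstimate (which counts every mismatch) by a search strategy: locate the FIRST mismatch along the diagonal; none means match, otherwise the word matches only if estimate is set and the suffix after that position matches exactly (early exit on a second mismatch), so no counter and no threshold comparison exists.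
import Mathlib
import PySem

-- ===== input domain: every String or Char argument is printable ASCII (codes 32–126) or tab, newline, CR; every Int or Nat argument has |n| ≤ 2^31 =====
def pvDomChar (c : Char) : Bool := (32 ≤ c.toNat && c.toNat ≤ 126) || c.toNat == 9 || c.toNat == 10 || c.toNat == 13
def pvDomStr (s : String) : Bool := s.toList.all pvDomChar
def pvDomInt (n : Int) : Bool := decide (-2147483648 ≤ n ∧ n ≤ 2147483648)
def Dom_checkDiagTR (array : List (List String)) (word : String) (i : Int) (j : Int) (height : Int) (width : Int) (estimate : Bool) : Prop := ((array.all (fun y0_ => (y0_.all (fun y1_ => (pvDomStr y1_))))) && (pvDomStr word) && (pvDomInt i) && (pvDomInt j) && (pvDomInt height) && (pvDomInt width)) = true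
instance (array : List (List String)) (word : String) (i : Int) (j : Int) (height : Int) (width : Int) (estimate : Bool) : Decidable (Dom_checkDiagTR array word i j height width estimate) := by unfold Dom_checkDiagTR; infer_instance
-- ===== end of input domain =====

-- B replaces A's build-the-diagonal-then-count strategy by a first-mismatch search with an
-- exact suffix check (no counter); objective: alternative, same asymptotic cost.

-- ===== PORT A =====
-- array[i-x][j+x]; exact wherever Python does not raise (Pre_ excludes IndexError; Python's
-- negative-index wraparound is kept by pyGetD)
def pvCell (array : List (List String)) (i j : Int) (x : Nat) : String :=
  PySem.List.pyGetD (PySem.List.pyGetD array (i - (x : Int)) []) (j + (x : Int)) ""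

-- the temp-building loop: for x in range(len(word)): temp.append(array[i-x][j+x])
def pvTemp (array : List (List String)) (i j : Int) (n : Nat) : List String :=
  (List.range n).foldl (fun t x => t ++ [pvCell array i j x]) []

-- compare(string, array): the early 'return False' is carried as the accumulator staying false
def pvCompare (w : List Char) (arr : List String) : Bool :=
  (List.range w.length).foldl
    (fun acc k => if String.ofList [w.getD k ' '] ≠ PySem.List.pyGetD arr (k : Int) "" then false else acc)
    true

def pvCompareEstimate (w : List Char) (arr : List String) : Bool :=
  if ((List.range w.length).foldl
      (fun acc k => if String.ofList [w.getD k ' '] ≠ PySem.List.pyGetD arr (k : Int) "" then acc + 1 else acc)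
      (0 : Nat)) > 1 then false
  else true

def checkDiagTR (array : List (List String)) (word : String) (i : Int) (j : Int) (height : Int) (width : Int) (estimate : Bool) : Bool :=
  if i - (word.toList.length : Int) + 1 > 0 ∧ j + (word.toList.length : Int) - 1 < width then
    if (pvCompare word.toList (pvTemp array i j word.toList.length) && !estimate)
        || (pvCompareEstimate word.toList (pvTemp array i j word.toList.length) && estimate) then true
    else false
  else false

-- ===== PORT B =====
-- k = next((x for x in range(n) if word[x] != array[i-x][j+x]), None)  → List.find? over range n
-- all(word[x] == array[i-x][j+x] for x in range(k+1, n))               → List.all over range' (k+1) (n-(k+1))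
def checkDiagTR_alt (array : List (List String)) (word : String) (i : Int) (j : Int) (height : Int) (width : Int) (estimate : Bool) : Bool :=
  if i - (word.toList.length : Int) + 1 > 0 ∧ j + (word.toList.length : Int) - 1 < width then
    match (List.range word.toList.length).find?
        (fun x => String.ofList [word.toList.getD x ' '] != pvCell array i j x) with
    | none => true
    | some k =>
      if estimate then
        (List.range' (k + 1) (word.toList.length - (k + 1))).all
          (fun x => String.ofList [word.toList.getD x ' '] == pvCell array i j x)
      else false
  else false

-- ===== PRECONDITION & SPEC =====
-- Pre_ excludes exactly the inputs on which Python's array[i-x][j+x] raises IndexError inside the guard.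
def Pre_checkDiagTR (array : List (List String)) (word : String) (i : Int) (j : Int) (height : Int) (width : Int) (estimate : Bool) : Prop :=
  (i - (word.toList.length : Int) + 1 > 0 ∧ j + (word.toList.length : Int) - 1 < width) →
    ∀ x : Nat, x < word.toList.length →
      PySem.Raise.InRange array.length (i - (x : Int)) ∧
      PySem.Raise.InRange (PySem.List.pyGetD array (i - (x : Int)) []).length (j + (x : Int))
instance (array : List (List String)) (word : String) (i : Int) (j : Int) (height : Int) (width : Int) (estimate : Bool) : Decidable (Pre_checkDiagTR array word i j height width estimate) := by unfold Pre_checkDiagTR; infer_instance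

def pvWitness_checkDiagTR : List (List String) × String × Int × Int × Int × Int × Bool :=
  ([["a"], ["b"]], "b", 1, 0, 2, 1, false)

def Spec_checkDiagTR (array : List (List String)) (word : String) (i : Int) (j : Int) (height : Int) (width : Int) (estimate : Bool) (out : Bool) : Prop := out = checkDiagTR_alt array word i j height width estimate
instance (array : List (List String)) (word : String) (i : Int) (j : Int) (height : Int) (width : Int) (estimate : Bool) (out : Bool) : Decidable (Spec_checkDiagTR array word i j height width estimate out) := by unfold Spec_checkDiagTR; infer_instance

-- ===== CLAIM =====
def Claim_equal_checkDiagTR : Prop := ∀ (array : List (List String)) (word : String) (i : Int) (j : Int) (height : Int) (width : Int) (estimate : Bool), Dom_checkDiagTR array word i j height width estimate → Pre_checkDiagTR array word i j height width estimate → Spec_checkDiagTR array word i j height width estimate (checkDiagTR array word i j height width estimate)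

-- ===== LEMMAS AND PROOFS =====

-- A's all-matched fold equals "accumulator && no element satisfies p"
theorem pv_foldl_false {α : Type} (p : α → Prop) [DecidablePred p] (l : List α) (b : Bool) :
    l.foldl (fun acc k => if p k then false else acc) b = (b && l.all (fun k => !decide (p k))) := by
  induction l generalizing b with
  | nil => simp
  | cons x xs ih =>
    simp only [List.foldl_cons, List.all_cons, ih]
    by_cases h : p x <;> simp [h]

-- A's mismatch-counting fold is a countP
theorem pv_foldl_count {α : Type} (p : α → Prop) [DecidablePred p] (l : List α) (c : Nat) :
    l.foldl (fun acc k => if p k then acc + 1 else acc) c = c + l.countP (fun k => decide (p k)) := by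
  induction l generalizing c with
  | nil => simp
  | cons x xs ih =>
    simp only [List.foldl_cons, List.countP_cons, ih]
    by_cases h : p x
    · simp [h]; omega
    · simp [h]

theorem pv_all_eq_count_zero {α : Type} (q : α → Bool) (l : List α) :
    l.all (fun k => !q k) = decide (l.countP q = 0) := by
  by_cases h : l.countP q = 0
  · simp only [h, decide_true, List.all_eq_true, Bool.not_eq_true']
    exact fun x hx => Bool.eq_false_iff.mpr (List.countP_eq_zero.mp h x hx)
  · simp only [h, decide_false]
    rcases List.countP_pos_iff.mp (Nat.pos_of_ne_zero h) with ⟨x, hx, hq⟩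
    rw [List.all_eq_false]
    exact ⟨x, hx, by simp [hq]⟩

theorem pvTemp_get (array : List (List String)) (i j : Int) (n k : Nat) (hk : k < n) :
    PySem.List.pyGetD (pvTemp array i j n) (k : Int) "" = pvCell array i j k := by
  unfold pvTemp
  rw [PySem.List.foldl_append_singleton_eq_map, PySem.List.pyGetD_natCast]
  simp [List.getD_eq_getElem?_getD, List.getElem?_range hk]

theorem pv_bne_decide (a b : String) : (a != b) = decide (a ≠ b) := by
  by_cases h : a = b <;> simp [h]

theorem pv_beq_decide (a b : String) : (a == b) = decide (a = b) := by
  by_cases h : a = b <;> simp [h]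

-- B's search: no first mismatch ⇔ the mismatch count is zero
theorem pv_find_none (p : Nat → Bool) (n : Nat) :
    ((List.range n).find? p = none) ↔ ((List.range n).countP p = 0) := by
  rw [List.find?_eq_none, List.countP_eq_zero]

-- B's search: a first mismatch at k splits the count as 1 + count on the tail range
theorem pv_find_some (p : Nat → Bool) (n k : Nat) (h : (List.range n).find? p = some k) :
    (List.range n).countP p = 1 + (List.range' (k + 1) (n - (k + 1))).countP p := by
  rcases List.find?_eq_some_iff_append.mp h with ⟨hp, as, bs, heq, has⟩
  have hlen : as.length + (bs.length + 1) = n := by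
    have := congrArg List.length heq
    simpa [Nat.add_comm, Nat.add_left_comm] using this.symm
  have hk : as.length = k := by
    have h1 : (List.range n)[as.length]? = some k := by
      rw [heq, List.getElem?_append_right (Nat.le_refl _)]
      simp
    have h2 : (List.range n)[as.length]? = some as.length :=
      List.getElem?_range (by omega)
    have := h1.symm.trans h2
    exact (Option.some.inj this).symm
  have hkn : k + 1 ≤ n := by omega
  have hsplit : List.range n = List.range (k + 1) ++ List.range' (k + 1) (n - (k + 1)) := by
    rw [List.range_eq_range']
    have := @List.range'_append 0 (k + 1) (n - (k + 1)) 1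
    simp only [Nat.one_mul, Nat.zero_add] at this
    rw [show (k + 1) + (n - (k + 1)) = n by omega] at this
    rw [← this, List.range_eq_range']
  have hbs : bs = List.range' (k + 1) (n - (k + 1)) := by
    have heq2 : (as ++ [k]) ++ bs = List.range (k + 1) ++ List.range' (k + 1) (n - (k + 1)) := by
      simpa [List.append_assoc] using heq.symm.trans hsplit
    exact List.append_inj_right heq2 (by simp [hk])
  have hasz : as.countP p = 0 := List.countP_eq_zero.mpr (fun a ha => by
    have := has a ha; simp at this; simp [this])
  rw [heq, List.countP_append, List.countP_cons, hasz, hbs, hp]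
  simp
  omega

-- ===== VERDICT =====
theorem checkDiagTR_spec : Claim_equal_checkDiagTR := by
  intro array word i j height width estimate _ _
  unfold Spec_checkDiagTR checkDiagTR checkDiagTR_alt
  by_cases hg : i - (word.toList.length : Int) + 1 > 0 ∧ j + (word.toList.length : Int) - 1 < width
  · rw [if_pos hg, if_pos hg]
    set n := word.toList.length with hn
    set p : Nat → Bool := fun x => decide (String.ofList [word.toList.getD x ' '] ≠ pvCell array i j x) with hp
    have hpred : (fun x => String.ofList [word.toList.getD x ' '] != pvCell array i j x) = p := by
      funext x; rw [pv_bne_decide]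
    have hcmp :
        pvCompare word.toList (pvTemp array i j n)
          = decide ((List.range n).countP p = 0) := by
      unfold pvCompare
      rw [PySem.List.foldl_congr_mem _ _
          (fun acc k => if String.ofList [word.toList.getD k ' '] ≠ pvCell array i j k then false else acc) _
          (fun acc k hk => by
            rw [pvTemp_get array i j n k (List.mem_range.mp hk)])]
      rw [pv_foldl_false, Bool.true_and, pv_all_eq_count_zero]
    have hest :
        pvCompareEstimate word.toList (pvTemp array i j n)
          = decide ((List.range n).countP p ≤ 1) := by
      unfold pvCompareEstimate
      rw [PySem.List.foldl_congr_mem _ _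
          (fun acc k => if String.ofList [word.toList.getD k ' '] ≠ pvCell array i j k then acc + 1 else acc) _
          (fun acc k hk => by
            rw [pvTemp_get array i j n k (List.mem_range.mp hk)])]
      rw [pv_foldl_count]
      rw [← hp, ← hn]
      simp only [Nat.zero_add]
      by_cases h1 : (List.range n).countP p ≤ 1
      · rw [if_neg (by omega), decide_eq_true h1]
      · rw [if_pos (by omega)]
        exact (decide_eq_false h1).symm
    rw [hcmp, hest, hpred]
    cases hf : (List.range n).find? p with
    | none =>
      have hz := (pv_find_none p n).mp hf
      simp [hz]
    | some k =>
      have hc := pv_find_some p n k hf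
      have hnz : ¬ (List.range n).countP p = 0 := by omega
      have hall : (List.range' (k + 1) (n - (k + 1))).all
            (fun x => String.ofList [word.toList.getD x ' '] == pvCell array i j x)
          = decide ((List.range' (k + 1) (n - (k + 1))).countP p = 0) := by
        rw [← pv_all_eq_count_zero p]
        refine List.all_congr rfl (fun x => ?_)
        simp [hp, pv_beq_decide]
      cases estimate with
      | false => simp [hnz]
      | true =>
        simp only [Bool.not_true, Bool.and_false, Bool.and_true, Bool.false_or]
        rw [hall, hc]
        by_cases h0 : (List.range' (k + 1) (n - (k + 1))).countP p = 0
        · rw [h0]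
          decide
        · rw [decide_eq_false h0, decide_eq_false
            (show ¬ 1 + (List.range' (k + 1) (n - (k + 1))).countP p ≤ 1 by omega)]
          rfl
  · rw [if_neg hg, if_neg hg]
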